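/-
  jsmn_s.bin, `jsmn_parse`: the first half of the primitive case — STRICT mode's check of the enclosing token
  (jsmn.c:414-421; 1004FEH – 100524H, 100576H – 100582H and the stub 10061BH: 20 instructions):
      if (tokens != NULL && parser->toksuper != -1) {
        const jsmntok_t *t = &tokens[parser->toksuper];
        if (t->type == JSMN_OBJECT || (t->type == JSMN_STRING && t->size != 0)) return JSMN_ERROR_INVAL;
      }
  `prim_check`: 1004FEH → 100526H (the call's argument set-up) with the frame unchanged when the model's `forbidden` is false,
                        → 100325H with -2 in r12d when it is true.
  Pure part: what `Jsmn.body` is for the first character of a primitive (`body_prim`).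
-/
import Prog.Jsmn.S.ParseCallLemmas

namespace X86
namespace J6
namespace S
open X86.User (CodeAt RegsKept Span FlagsOK Layout toNat_add_ofNat toNat_ofNat_lt' add_ofNat_add)
open Jsmn JsmnSBytes

set_option maxRecDepth 100000
set_option maxHeartbeats 4000000
set_option linter.unusedSimpArgs false
set_option linter.unusedVariables false

/-- The strict-mode test of the enclosing token, as `Jsmn.body` writes it: there is a token array, a superior token, and it is an object, or
a string (a key) that already has its value. -/
def forbidden (s : St) : Bool :=
  match s.toks with
  | none => false
  | some ts =>
    s.p.toksuper != -1 &&
      ((tokAt ts s.p.toksuper).type == JSMN_OBJECT ||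
        ((tokAt ts s.p.toksuper).type == JSMN_STRING && (tokAt ts s.p.toksuper).size != 0))

/-- The first character of a primitive is none of the characters of the other cases. -/
theorem primStart_ne {ch : UInt8} (h : primStart ch = true) :
    ch ≠ 0x7b ∧ ch ≠ 0x5b ∧ ch ≠ 0x7d ∧ ch ≠ 0x5d ∧ ch ≠ 0x22 ∧ ch ≠ 0x09 ∧ ch ≠ 0x0d ∧ ch ≠ 0x0a ∧ ch ≠ 0x20 ∧ ch ≠ 0x3a ∧ ch ≠ 0x2c := by
  refine ⟨?_, ?_, ?_, ?_, ?_, ?_, ?_, ?_, ?_, ?_, ?_⟩ <;> (intro e; subst e; revert h; decide)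

/-- The switch, for the first character of a primitive: the strict check, then `primitiveCase`. -/
theorem body_prim {js : List UInt8} {fuel nt : Nat} {s : St} {ch : UInt8} (hok : primStart ch = true) :
    body Config.strictLinks js fuel nt s ch =
      if forbidden s then some (.ret JSMN_ERROR_INVAL s) else primitiveCase Config.strictLinks js fuel nt s := by
  obtain ⟨h1, h2, h3, h4, h5, h6, h7, h8, h9, h10, h11⟩ := primStart_ne hok
  unfold body forbidden
  simp [h1, h2, h3, h4, h5, h6, h7, h8, h9, h10, h11, hok, Config.strictLinks]
  obtain ⟨p, toks, count⟩ := s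
  cases toks <;> rfl

theorem body_prim_none {js : List UInt8} {fuel nt : Nat} {s : St} {ch : UInt8} (hok : primStart ch = true) (hf : forbidden s = false)
    (h : parsePrimitive Config.strictLinks js fuel s.p s.toks nt = none) : body Config.strictLinks js fuel nt s ch = none := by
  rw [body_prim hok, hf]
  unfold primitiveCase
  simp [h]

theorem body_prim_some {js : List UInt8} {fuel nt : Nat} {s : St} {ch : UInt8} {r : Int} {p : Parser} {toks : Option Tokens}
    (hok : primStart ch = true) (hf : forbidden s = false)
    (h : parsePrimitive Config.strictLinks js fuel s.p s.toks nt = some (r, p, toks)) :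
    body Config.strictLinks js fuel nt s ch =
      if r < 0 then some (.ret r ⟨p, toks, s.count⟩) else some (.next ⟨p, bumpSuper p toks, i32 (s.count + 1)⟩) := by
  rw [body_prim hok, hf]
  unfold primitiveCase
  simp [h]

/-- `forbidden` with the superior token `j`. -/
theorem forbidden_some {s : St} {ts : Tokens} {j : Nat} (hst : s.toks = some ts) (hj : s.p.toksuper = j) :
    forbidden s = ((ts.getD j default).type == JSMN_OBJECT || ((ts.getD j default).type == JSMN_STRING && (ts.getD j default).size != 0)) := by
  have : ¬ ((j : Int) = -1) := by omega
  unfold forbidden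
  rw [hst]
  simp only [hj, A2.tokAt_nat]
  simp [this]

variable {n : User.Layout}

/-- **1004FEH → 100526H | 100325H**: the strict check of the enclosing token. Nothing is written; only rax and rdx change. -/
theorem prim_check {c : PCtx} {v0 v : User.State} {s : St} (hrip : v.rip = 0x1004fe) (hfr : Frame c n v0 v s) :
    Reach n v (fun v' => (forbidden s = false ∧ v'.rip = 0x100526 ∧ Frame c n v0 v' s) ∨
      (forbidden s = true ∧ AtRet c n v0 v' JSMN_ERROR_INVAL s)) := by
  have hco := hfr.core
  have hp := hco.entry.pre
  have hinv := hfr.inv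
  have himg := hco.image
  have hcode := hco.code
  have hfetch := hp.call.fetch
  have hpa := hco.parser
  have hta := hco.toksArg
  obtain ⟨hsupraw, hsupr1, hsupr2⟩ := hpa.toksuper
  v3_open hrip hco.rsp hco.rbp hco.r13 hp.call hp.env.parserR
  clear hp_call_rip
  j6_bin
  -- the ends of the two kinds of path
  have hgo : ∀ v' : User.State, v'.mem = v.mem → RegsKept scratch v v' → Frame c n v0 v' s := fun v' hm hk => hfr.of_kept hm hk
  have hstop : ∀ v' : User.State, v'.mem = v.mem → RegsKept (.r12 :: scratch) v v' → FrameCore c n v0 v' s.p s.toks := fun v' hm hk => hco.of_kept hm hk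
  cases hst : s.toks with
  | none =>
    -- counting mode
    rw [hst] at hta
    have htb0 : c.tb = 0 := hta
    have hf : forbidden s = false := by unfold forbidden; rw [hst]
    v3_walk hcode hfetch [show ((233 : Nat) == 235) = false by decide, show ((233 : UInt8) == 235) = false by decide, show ((233 : UInt64) == 235) = false by decide] until [0x100526, 0x100325]
    exact Reach.done (Or.inl ⟨hf, by simp, hgo _ (by v3_memnorm) (by v3_kept)⟩)
  | some ts =>
    rw [hst] at hta
    obtain ⟨htb0, htlen, htoks⟩ := hta
    have htinv := hinv.toks ts hst
    have hsuplo := htinv.superLo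
    have hsuphi := htinv.superHi
    simp only [links_strictLinks, if_true] at hsuphi
    have hnextle := htinv.toknext
    have hsmall := htinv.small
    have htbn : c.tb.toNat ≠ 0 := fun h => htb0 (UInt64.toNat_inj.mp h)
    by_cases hm1 : s.p.toksuper = -1
    · -- no superior token
      have hsupv : v.mem.readLE (c.pa + 8) 4 = 4294967295 := by rw [hsupraw, hm1]; rfl
      clear hsupraw
      have hf : forbidden s = false := by unfold forbidden; rw [hst]; simp [hm1]
      v3_walk hcode hfetch [show ((233 : Nat) == 235) = false by decide, show ((233 : UInt8) == 235) = false by decide, show ((233 : UInt64) == 235) = false by decide] until [0x100526, 0x100325]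
      exact Reach.done (Or.inl ⟨hf, by simp, hgo _ (by v3_memnorm) (by v3_kept)⟩)
    · obtain ⟨j, hj⟩ : ∃ j : Nat, s.p.toksuper = j := ⟨s.p.toksuper.toNat, by omega⟩
      have hjlt : j < c.numTokens := by omega
      have hsupv : v.mem.readLE (c.pa + 8) 4 = j := by rw [hsupraw, hj]; unfold u32; omega
      clear hsupraw
      have hsext := Word.sext32_ofNat_of_lt j (by omega)
      have hlea := lea20_ofNat j (by omega)
      have hlow := Word.low32_ofNat_of_lt (n := j) (by omega)
      have hjl : j < ts.length := htlen ▸ hjlt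
      have hmulj := tokSize_mul_le Config.strictLinks hjl
      rw [tokSize_strictLinks, htlen] at hmulj
      have henv := hp.env
      have htb : toksBytes binS.cfg c.numTokens c.toks0 = 20 * c.numTokens := by
        rw [← toksBytes_congr _ _ hco.null, hst]; rfl
      rw [htb] at henv
      have hR := henv.toksR.resolve_left htb0
      v3_open hR
      j6_bin
      have htj := htoks.getD j hjl
      rw [A2.tokAddr20] at htj
      have htjt := htj.type
      obtain ⟨hszraw, hszlo, hszhi⟩ := htj.size
      have hfb := forbidden_some hst hj
      generalize ts.getD j default = tk at htj htjt hszraw hszlo hszhi hfb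
      by_cases hobj : tk.type = 1
      · -- an object: return JSMN_ERROR_INVAL
        rw [hobj] at htjt
        have hf : forbidden s = true := by rw [hfb]; simp [hobj, JSMN_OBJECT]
        v3_walk hcode hfetch [hsext, hlea, show ((233 : Nat) == 235) = false by decide, show ((233 : UInt8) == 235) = false by decide, show ((233 : UInt64) == 235) = false by decide] until [0x100526, 0x100325]
        exact Reach.done (Or.inr ⟨hf, by simp, hstop _ (by v3_memnorm) (by v3_kept), by v3_regnorm; decide⟩)
      · by_cases hstr : tk.type = 4
        · rw [hstr] at htjt
          by_cases hsz : tk.size = 0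
          · -- a key without a value yet: go on
            have hszv : v.mem.readLE (c.tb + UInt64.ofNat (20 * j) + 12) 4 = 0 := by rw [hszraw, hsz]; rfl
            clear hszraw
            have hf : forbidden s = false := by rw [hfb]; simp [hstr, hsz, JSMN_OBJECT, JSMN_STRING]
            v3_walk hcode hfetch [hsext, hlea, show ((233 : Nat) == 235) = false by decide, show ((233 : UInt8) == 235) = false by decide, show ((233 : UInt64) == 235) = false by decide] until [0x100526, 0x100325]
            exact Reach.done (Or.inl ⟨hf, by simp, hgo _ (by v3_memnorm) (by v3_kept)⟩)
          · -- a key that has its value: return JSMN_ERROR_INVAL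
            obtain ⟨m, hszv, hmne, hmlt⟩ : ∃ m : Nat, v.mem.readLE (c.tb + UInt64.ofNat (20 * j) + 12) 4 = m ∧ m ≠ 0 ∧ m < 4294967296 :=
              ⟨_, hszraw, by unfold u32; omega, u32_lt _⟩
            clear hszraw
            have hf : forbidden s = true := by rw [hfb]; simp [hstr, hsz, JSMN_OBJECT, JSMN_STRING]
            v3_walk hcode hfetch [hsext, hlea, show ((233 : Nat) == 235) = false by decide, show ((233 : UInt8) == 235) = false by decide, show ((233 : UInt64) == 235) = false by decide] until [0x100526, 0x100325]
            exact Reach.done (Or.inr ⟨hf, by simp, hstop _ (by v3_memnorm) (by v3_kept), by v3_regnorm; decide⟩)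
        · -- an array, a primitive, …: go on
          have htylt : tk.type < 4294967296 := htjt ▸ User.Mem.readLE4_lt _ _
          obtain ⟨ty, hty, hty1, hty4, hty5⟩ : ∃ ty : Nat, v.mem.readLE (c.tb + UInt64.ofNat (20 * j)) 4 = ty ∧ ty ≠ 1 ∧ ty ≠ 4 ∧ ty < 4294967296 :=
            ⟨_, htjt, hobj, hstr, htylt⟩
          clear htjt
          have hf : forbidden s = false := by rw [hfb]; simp [hobj, hstr, JSMN_OBJECT, JSMN_STRING]
          v3_walk hcode hfetch [hsext, hlea, show ((233 : Nat) == 235) = false by decide, show ((233 : UInt8) == 235) = false by decide, show ((233 : UInt64) == 235) = false by decide] until [0x100526, 0x100325]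
          exact Reach.done (Or.inl ⟨hf, by simp, hgo _ (by v3_memnorm) (by v3_kept)⟩)

end S
end J6
end X86
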